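-- pv_equiv track=rewrite | github.com/matthewdeanmartin/openmock | openmock/fake_server.py | _merge_patch
-- ===== SOURCE A (Python) =====
-- import copy
-- from typing import Any
--
-- def _deepcopy(value: Any) -> Any:
--     return copy.deepcopy(value)
--
-- def _merge_patch(existing: dict[str, Any], patch: dict[str, Any]) -> dict[str, Any]:
--     merged = _deepcopy(existing)
--     for key, value in patch.items():
--         if isinstance(value, dict) and isinstance(merged.get(key), dict):
--             merged[key] = _merge_patch(merged[key], value)
--         else:
--             merged[key] = _deepcopy(value)
--     return merged
-- ===== SOURCE B (Python) =====
-- import copy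
--
--
-- def _merge_patch(existing, patch):
--     # Build the result in one pass: a comprehension over `existing` (merging
--     # where `patch` overlaps) plus the fresh keys of `patch` appended; no
--     # up-front deepcopy of the whole `existing` and no in-place mutation.
--     def pick(ev, pv):
--         if isinstance(ev, dict) and isinstance(pv, dict):
--             return _merge_patch(ev, pv)
--         return copy.deepcopy(pv)
--
--     merged = {
--         k: pick(ev, patch[k]) if k in patch else copy.deepcopy(ev)
--         for k, ev in existing.items()
--     }
--     merged.update(
--         (k, copy.deepcopy(v)) for k, v in patch.items() if k not in existing
--     )
--     return merged
-- ===== Notes on version B (the rewrite author's own statement) =====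
-- stated objective: alternative
-- what changed: B builds the merged dict in a single comprehension pass over existing (recursively merging where patch overlaps) and then appends patch's fresh keys, instead of A's deepcopy of all of existing followed by key-by-key in-place insertion that re-copies each overlapping subtree at every recursion level.
import Mathlib
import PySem

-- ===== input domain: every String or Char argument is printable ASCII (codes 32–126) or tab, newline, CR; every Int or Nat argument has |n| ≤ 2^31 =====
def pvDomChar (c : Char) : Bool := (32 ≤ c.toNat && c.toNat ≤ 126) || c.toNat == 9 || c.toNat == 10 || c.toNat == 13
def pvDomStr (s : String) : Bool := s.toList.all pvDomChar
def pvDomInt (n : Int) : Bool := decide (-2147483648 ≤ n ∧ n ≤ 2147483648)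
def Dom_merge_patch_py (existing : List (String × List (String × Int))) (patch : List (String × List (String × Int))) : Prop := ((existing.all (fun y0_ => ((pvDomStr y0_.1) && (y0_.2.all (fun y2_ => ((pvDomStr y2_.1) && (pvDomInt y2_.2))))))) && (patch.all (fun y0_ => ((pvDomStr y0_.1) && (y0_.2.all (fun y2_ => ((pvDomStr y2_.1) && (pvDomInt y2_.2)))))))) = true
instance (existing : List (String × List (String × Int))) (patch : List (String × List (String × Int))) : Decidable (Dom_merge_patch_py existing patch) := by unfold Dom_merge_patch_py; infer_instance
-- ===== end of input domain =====

-- B builds the merged dict in one pass (a comprehension over `existing`, merging where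
-- `patch` overlaps, then the fresh `patch` keys appended) instead of deepcopying all of
-- `existing` up front and inserting the patch keys one by one (objective: alternative).


-- The Python arguments are dicts of dicts; their assoc-list wire form is turned into the
-- actual nested dict both Pythons receive (shared boundary conversion, used by both ports).
def pvToD (xs : List (String × List (String × Int))) : PySem.Dict String (PySem.Dict String Int) :=
  PySem.Dict.ofList (xs.map (fun p => (p.1, PySem.Dict.ofList p.2)))

-- ===== PORT A =====
-- A's recursive call at the inner (int-valued) level: merged = deepcopy(existing);
-- for key, value in patch.items(): value is an int, so merged[key] = deepcopy(value).
def pyMergeInnerA (existing patch : PySem.Dict String Int) : PySem.Dict String Int :=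
  patch.items.foldl (fun m kv => m.insert kv.1 kv.2) existing

-- merged = deepcopy(existing); for key, value in patch.items():
--   value is always a dict here; merged.get(key) is a dict iff key is present:
--   present -> merged[key] = _merge_patch(merged[key], value); else merged[key] = deepcopy(value)
def merge_patch_py (existing : List (String × List (String × Int))) (patch : List (String × List (String × Int))) : List (String × List (String × Int)) :=
  ((pvToD patch).items.foldl
      (fun m kv =>
        match m.get? kv.1 with
        | some inner => m.insert kv.1 (pyMergeInnerA inner kv.2)
        | none => m.insert kv.1 kv.2)
      (pvToD existing)).items.map (fun q => (q.1, q.2.items))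

-- ===== PORT B =====
-- B's recursive call at the inner level: {k: (pv[k] if k in pv else v) for k, v in ev.items()}
-- followed by the fresh keys of pv appended (merged.update of the fresh items).
def pvAltInner (ev pv : PySem.Dict String Int) : PySem.Dict String Int :=
  PySem.Dict.mk
    (ev.items.map (fun kv => (kv.1,
        match pv.get? kv.1 with
        | some w => w
        | none => kv.2))
      ++ pv.items.filter (fun q => !(ev.contains q.1)))

-- merged = {k: pick(ev, patch[k]) if k in patch else ev  for k, ev in existing.items()}
-- (pick recurses, both values being dicts); merged.update(fresh items of patch)
def merge_patch_py_alt (existing : List (String × List (String × Int))) (patch : List (String × List (String × Int))) : List (String × List (String × Int)) :=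
  (PySem.Dict.mk
      ((pvToD existing).items.map (fun kv => (kv.1,
          match (pvToD patch).get? kv.1 with
          | some pv => pvAltInner kv.2 pv
          | none => kv.2))
        ++ (pvToD patch).items.filter (fun q => !((pvToD existing).contains q.1)))).items.map
    (fun q => (q.1, q.2.items))

-- ===== PRECONDITION & SPEC =====
def Spec_merge_patch_py (existing : List (String × List (String × Int))) (patch : List (String × List (String × Int))) (out : List (String × List (String × Int))) : Prop := out = merge_patch_py_alt existing patch
instance (existing : List (String × List (String × Int))) (patch : List (String × List (String × Int))) (out : List (String × List (String × Int))) : Decidable (Spec_merge_patch_py existing patch out) := by unfold Spec_merge_patch_py; infer_instance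

-- ===== CLAIM (what is proved, stated in full; the proofs are below) =====
def Claim_equal_merge_patch_py : Prop := ∀ (existing : List (String × List (String × Int))) (patch : List (String × List (String × Int))), Dom_merge_patch_py existing patch → Spec_merge_patch_py existing patch (merge_patch_py existing patch)

-- ===== LEMMAS AND PROOFS =====

-- A's branch on merged.get(key), written as a value-selector.
def pvGA (o : Option (PySem.Dict String Int)) (v : PySem.Dict String Int) : PySem.Dict String Int :=
  match o with
  | some inner => pyMergeInnerA inner v
  | none => v

-- An insert-loop over a dict's items (distinct keys), where the inserted value may read
-- the current binding, equals: existing items overridden pointwise ++ the fresh items.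
theorem pv_foldl_insert_items {ν ν' : Type} (g : Option ν → ν' → ν)
    (qs : List (String × ν')) (d : PySem.Dict String ν)
    (hq : (qs.map Prod.fst).Nodup) (hd : d.keys.Nodup) :
    (qs.foldl (fun m kv => m.insert kv.1 (g (m.get? kv.1) kv.2)) d).items
    = d.items.map (fun kv => (kv.1,
        match (PySem.Dict.mk qs).get? kv.1 with
        | some w => g (some kv.2) w
        | none => kv.2))
      ++ (qs.filter (fun q => !(d.contains q.1))).map (fun q => (q.1, g none q.2)) := by
  induction qs generalizing d with
  | nil => simp [PySem.Dict.get?]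
  | cons q rest ih =>
    obtain ⟨qk, qv⟩ := q
    obtain ⟨hq1, hq2⟩ := List.nodup_cons.mp hq
    have hfind : (PySem.Dict.mk rest).get? qk = none := by
      rw [PySem.Dict.get?_eq_none_iff_not_mem_keys]
      simpa [PySem.Dict.keys] using hq1
    simp only [List.foldl_cons]
    rw [ih (d.insert qk (g (d.get? qk) qv)) hq2 (PySem.Dict.nodup_keys_insert _ _ _ hd)]
    have hfilter : rest.filter (fun r => !((d.insert qk (g (d.get? qk) qv)).contains r.1))
        = rest.filter (fun r => !(d.contains r.1)) := by
      apply List.filter_congr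
      intro r hr
      have hb : (r.1 == qk) = false := by
        simp only [beq_eq_false_iff_ne, ne_eq]
        intro h; exact hq1 (List.mem_map.mpr ⟨r, hr, h⟩)
      rw [PySem.Dict.contains_insert, hb]
      simp
    rcases Bool.eq_false_or_eq_true (d.contains qk) with hc | hc
    · -- key already in d: the insert overrides in place
      rw [PySem.Dict.items_insert_of_contains _ _ hc, hfilter, List.map_map]
      have hfc : ((qk, qv) :: rest).filter (fun r => !(d.contains r.1))
          = rest.filter (fun r => !(d.contains r.1)) := by
        simp [hc]
      rw [hfc]
      congr 1
      apply List.map_congr_left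
      intro p hp
      obtain ⟨pk, pv⟩ := p
      simp only [Function.comp_apply]
      by_cases hpq : pk = qk
      · subst hpq
        have hb : (pk == pk) = true := by simp
        have hget : d.get? pk = some pv := PySem.Dict.get?_of_mem_items d hp hd
        simp only [hb, if_true]
        rw [PySem.Dict.get?_mk_cons]
        simp [hfind, hget]
      · have hb : (pk == qk) = false := by simp [hpq]
        have hb' : (qk == pk) = false := by simp [Ne.symm hpq]
        simp only [hb]
        rw [PySem.Dict.get?_mk_cons, hb']
        simp
    · -- key fresh in d: the insert appends
      have hget : d.get? qk = none := (PySem.Dict.get?_eq_none_iff_contains d qk).mpr hc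
      have hkey : ∀ p ∈ d.items, p.1 ≠ qk := by
        intro p hp h
        have : d.contains qk = true :=
          (PySem.Dict.contains_iff_mem_keys d qk).mpr (List.mem_map.mpr ⟨p, hp, h⟩)
        simp [hc] at this
      rw [PySem.Dict.items_insert_of_not_contains _ _ hc, hfilter, hget, List.map_append]
      have hsingle : [(qk, g none qv)].map (fun kv => (kv.1,
          match (PySem.Dict.mk rest).get? kv.1 with
          | some w => g (some kv.2) w
          | none => kv.2)) = [(qk, g none qv)] := by
        simp [hfind]
      rw [hsingle]
      have hmid : d.items.map (fun kv => (kv.1,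
            match (PySem.Dict.mk rest).get? kv.1 with
            | some w => g (some kv.2) w
            | none => kv.2))
          = d.items.map (fun kv => (kv.1,
            match (PySem.Dict.mk ((qk, qv) :: rest)).get? kv.1 with
            | some w => g (some kv.2) w
            | none => kv.2)) := by
        apply List.map_congr_left
        intro p hp
        have hb : (qk == p.1) = false := by
          simp only [beq_eq_false_iff_ne, ne_eq]
          intro h; exact hkey p hp h.symm
        rw [PySem.Dict.get?_mk_cons, hb]
        simp
      rw [hmid]
      have hfc : ((qk, qv) :: rest).filter (fun r => !(d.contains r.1))
          = (qk, qv) :: rest.filter (fun r => !(d.contains r.1)) := by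
        simp [hc]
      rw [hfc]
      simp

-- membership in the items of an insert-loop comes from the start dict or the inserted values
theorem pv_mem_items_foldl_insert {ν : Type} (ps : List (String × ν)) (d : PySem.Dict String ν)
    (kv : String × ν) (h : kv ∈ (ps.foldl (fun acc p => acc.insert p.1 p.2) d).items) :
    kv ∈ d.items ∨ kv.2 ∈ ps.map Prod.snd := by
  induction ps generalizing d with
  | nil => exact Or.inl h
  | cons p rest ih =>
    simp only [List.foldl_cons] at h
    rcases ih (d.insert p.1 p.2) h with h' | h'
    · rcases (PySem.Dict.mem_items_insert _ _ _ _).mp h' with h'' | ⟨h'', _⟩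
      · right; subst h''; simp
      · exact Or.inl h''
    · right; simp only [List.map_cons, List.mem_cons]; exact Or.inr h'

-- every value stored in pvToD xs is itself a dict built by ofList, so its keys are distinct
theorem pv_toD_value_nodup (xs : List (String × List (String × Int))) :
    ∀ kv ∈ (pvToD xs).items, kv.2.keys.Nodup := by
  intro kv h
  have h' : kv ∈ ((xs.map (fun p => (p.1, PySem.Dict.ofList p.2))).foldl
      (fun acc p => acc.insert p.1 p.2) PySem.Dict.empty).items := h
  rcases pv_mem_items_foldl_insert _ _ _ h' with h'' | h''
  · simp [PySem.Dict.empty] at h''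
  · simp only [List.map_map, List.mem_map, Function.comp_apply] at h''
    obtain ⟨p, _, hp⟩ := h''
    rw [← hp]
    exact PySem.Dict.nodup_keys_ofList _
theorem pv_get?_value_nodup (xs : List (String × List (String × Int))) (k : String)
    (pv : PySem.Dict String Int) (h : (pvToD xs).get? k = some pv) : pv.keys.Nodup := by
  unfold PySem.Dict.get? at h
  cases hf : List.find? (fun p => p.1 == k) (pvToD xs).items with
  | none => rw [hf] at h; simp at h
  | some q =>
    rw [hf] at h
    simp only [Option.map_some, Option.some.injEq] at h
    have hmem := List.mem_of_find?_eq_some hf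
    have := pv_toD_value_nodup xs q hmem
    rwa [h] at this

-- at the inner level the two strategies build the same dict (keys distinct on both sides)
theorem pv_inner_eq (ev pv : PySem.Dict String Int)
    (he : ev.keys.Nodup) (hp : pv.keys.Nodup) :
    pyMergeInnerA ev pv = pvAltInner ev pv := by
  apply PySem.Dict.ext
  unfold pyMergeInnerA pvAltInner
  refine Eq.trans (pv_foldl_insert_items (fun _ w => w) pv.items ev hp he) ?_
  congr 1
  · apply List.map_congr_left
    intro kv _
    rw [show PySem.Dict.mk pv.items = pv from rfl]
    cases pv.get? kv.1 <;> rfl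
  · simp

-- ===== VERDICT (by name: the statement is the Claim_ definition above) =====
theorem merge_patch_py_spec : Claim_equal_merge_patch_py := by
  intro existing patch _
  unfold Spec_merge_patch_py merge_patch_py merge_patch_py_alt
  have hfun : (fun (m : PySem.Dict String (PySem.Dict String Int)) (kv : String × PySem.Dict String Int) =>
        match m.get? kv.1 with
        | some inner => m.insert kv.1 (pyMergeInnerA inner kv.2)
        | none => m.insert kv.1 kv.2)
      = (fun m kv => m.insert kv.1 (pvGA (m.get? kv.1) kv.2)) := by
    funext m kv
    cases m.get? kv.1 <;> rfl
  rw [hfun, pv_foldl_insert_items pvGA (pvToD patch).items (pvToD existing)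
        (PySem.Dict.nodup_keys_ofList _) (PySem.Dict.nodup_keys_ofList _)]
  have hmk : PySem.Dict.mk (pvToD patch).items = pvToD patch := rfl
  rw [hmk]
  congr 1
  congr 1
  · apply List.map_congr_left
    intro kv hkv
    cases hg : (pvToD patch).get? kv.1 with
    | none => simp
    | some pv =>
      simp only [pvGA]
      rw [pv_inner_eq kv.2 pv (pv_toD_value_nodup existing kv hkv)
            (pv_get?_value_nodup patch kv.1 pv hg)]
  · have hmap : (fun (q : String × PySem.Dict String Int) => (q.1, pvGA none q.2)) = id := by
      funext q; rfl
    rw [hmap, List.map_id]
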